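-- pv_equiv track=rewrite | github.com/u3609424/render_project | operation_safeguard.py | reverse_encode_index_parity
-- ===== SOURCE A (Python) =====
-- def reverse_encode_index_parity(x):
--     words = x.split()
--     result = []
--     for word in words:
--         n = len(word)
--         mid = (n + 1) // 2
--         original = [''] * n
--         even_idx = 0
--         odd_idx = mid
--         for i in range(n):
--             if i % 2 == 0:
--                 original[i] = word[even_idx]
--                 even_idx += 1
--             else:
--                 original[i] = word[odd_idx]
--                 odd_idx += 1
--         result.append(''.join(original))
--     return ' '.join(result)
-- ===== SOURCE B (Python) =====
-- def reverse_encode_index_parity(x):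
--     def rebuild(word):
--         mid = (len(word) + 1) // 2
--         first, second = word[:mid], word[mid:]
--         return ''.join(a + b for a, b in zip(first, second)) + first[len(second):]
--     return ' '.join(rebuild(word) for word in x.split())
-- ===== Notes on version B (the rewrite author's own statement) =====
-- stated objective: simpler
-- what changed: Replaces the parity-indexed fill loop with two dual cursors and a preallocated slot array by slicing each word into its two halves and interleaving them with zip plus the leftover middle character.
import Mathlib
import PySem

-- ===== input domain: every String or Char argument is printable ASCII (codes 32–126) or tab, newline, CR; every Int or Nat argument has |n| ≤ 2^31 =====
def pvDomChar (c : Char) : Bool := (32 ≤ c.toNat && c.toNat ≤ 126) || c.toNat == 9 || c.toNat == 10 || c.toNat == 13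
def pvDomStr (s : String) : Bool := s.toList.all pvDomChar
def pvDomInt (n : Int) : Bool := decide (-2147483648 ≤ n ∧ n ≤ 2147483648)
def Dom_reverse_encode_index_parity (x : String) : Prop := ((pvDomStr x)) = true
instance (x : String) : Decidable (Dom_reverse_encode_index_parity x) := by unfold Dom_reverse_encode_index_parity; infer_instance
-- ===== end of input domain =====

-- B rebuilds each word from its two halves with zip instead of A's parity-indexed fill loop; same result, same cost (objective: simpler).

-- ===== PORT A =====
-- inner loop body of A: state = (original, even_idx, odd_idx)
def pvAStep (w : List Char) (s : List (List Char) × Int × Int) (i : Int) :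
    List (List Char) × Int × Int :=
  if PySem.Int.mod i 2 = 0 then
    (PySem.List.pySetD s.1 i [PySem.List.pyGetD w s.2.1 ' '], s.2.1 + 1, s.2.2)
  else
    (PySem.List.pySetD s.1 i [PySem.List.pyGetD w s.2.2 ' '], s.2.1, s.2.2 + 1)

-- per-word body of A's outer loop
def pvAWord (w : List Char) : List Char :=
  let n : Int := (w.length : Int)
  let mid : Int := PySem.Int.floordiv (n + 1) 2
  let st := (PySem.List.pyRange 0 n 1).foldl (pvAStep w) (List.replicate w.length ([] : List Char), 0, mid)
  PySem.Chars.join [] st.1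

def reverse_encode_index_parity (x : String) : String :=
  let words := PySem.Chars.split₀ x.toList
  let result := words.foldl (fun acc w => acc ++ [pvAWord w]) []
  String.ofList (PySem.Chars.join [' '] result)

-- ===== PORT B =====
-- per-word rebuild of B: slice into halves, interleave with zip, append the leftover slice
def pvBWord (w : List Char) : List Char :=
  let mid : Int := ((w.length + 1) / 2 : Nat)
  let first := PySem.List.slice w none (some mid)
  let second := PySem.List.slice w (some mid) none
  PySem.Chars.join [] ((first.zip second).map (fun p => [p.1, p.2])) ++
    PySem.List.slice first (some (second.length : Int)) none

def reverse_encode_index_parity_alt (x : String) : String :=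
  String.ofList (PySem.Chars.join [' '] ((PySem.Chars.split₀ x.toList).map pvBWord))

-- ===== PRECONDITION & SPEC =====
def Spec_reverse_encode_index_parity (x : String) (out : String) : Prop := out = reverse_encode_index_parity_alt x
instance (x : String) (out : String) : Decidable (Spec_reverse_encode_index_parity x out) := by unfold Spec_reverse_encode_index_parity; infer_instance

-- ===== CLAIM (what is proved, stated in full; the proofs are below) =====
def Claim_equal_reverse_encode_index_parity : Prop := ∀ (x : String), Dom_reverse_encode_index_parity x → Spec_reverse_encode_index_parity x (reverse_encode_index_parity x)

-- ===== LEMMAS AND PROOFS =====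

-- the common index-parity description of a rebuilt word
def pvPos (w : List Char) (i : Nat) : Char :=
  if i % 2 = 0 then w.getD (i / 2) ' ' else w.getD ((w.length + 1) / 2 + i / 2) ' '

def pvPosMap (w : List Char) : List Char := (List.range w.length).map (pvPos w)

theorem pv_getD_append_right (f s : List Char) (n : Nat) :
    (f ++ s).getD (f.length + n) ' ' = s.getD n ' ' := by
  simp [List.getD_eq_getElem?_getD, List.getElem?_append_right]

theorem pv_join_nil_flatten (l : List (List Char)) : PySem.Chars.join [] l = l.flatten := by
  induction l with
  | nil => rfl
  | cons a t ih =>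
    cases t with
    | nil => simp [PySem.Chars.join_singleton]
    | cons b t' => rw [PySem.Chars.join_cons_cons]; simp_all

theorem pvInterleave (s f : List Char) (h1 : s.length ≤ f.length) (h2 : f.length ≤ s.length + 1) :
    ((f.zip s).map (fun p => [p.1, p.2])).flatten ++ f.drop s.length
      = (List.range (f.length + s.length)).map (fun i =>
          if i % 2 = 0 then (f ++ s).getD (i / 2) ' ' else (f ++ s).getD (f.length + i / 2) ' ') := by
  induction s generalizing f with
  | nil =>
    match f, h2 with
    | [], _ => simp
    | [a], _ => simp
  | cons b s' ih =>
    match f, h1 with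
    | a :: f', hx =>
      have hb1 : s'.length ≤ f'.length := by simp at hx; omega
      have hb2 : f'.length ≤ s'.length + 1 := by simp at h2; omega
      have tail_eq : (List.range (f'.length + s'.length)).map
            (fun i => if i % 2 = 0 then (f' ++ s').getD (i / 2) ' '
                      else (f' ++ s').getD (f'.length + i / 2) ' ')
          = (List.range (f'.length + s'.length)).map
            ((fun i => if i % 2 = 0 then ((a :: f') ++ (b :: s')).getD (i / 2) ' '
                       else ((a :: f') ++ (b :: s')).getD ((a :: f').length + i / 2) ' ')
              ∘ Nat.succ ∘ Nat.succ) := by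
        apply List.map_congr_left
        intro i hi
        have hi' : i < f'.length + s'.length := List.mem_range.mp hi
        show _ = (if (i + 1 + 1) % 2 = 0 then ((a :: f') ++ (b :: s')).getD ((i + 1 + 1) / 2) ' '
                  else ((a :: f') ++ (b :: s')).getD ((a :: f').length + (i + 1 + 1) / 2) ' ')
        have e1 : (i + 1 + 1) % 2 = i % 2 := by omega
        have e2 : (i + 1 + 1) / 2 = i / 2 + 1 := by omega
        rw [e1, e2]
        by_cases hp : i % 2 = 0
        · have hf : i / 2 < f'.length := by omega
          rw [if_pos hp, if_pos hp]
          show (f' ++ s').getD (i / 2) ' ' = ((a :: f') ++ b :: s').getD (i / 2 + 1) ' '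
          rw [List.cons_append, List.getD_cons_succ]
          rw [List.getD_append _ _ _ _ hf, List.getD_append _ _ _ _ hf]
        · rw [if_neg hp, if_neg hp]
          show (f' ++ s').getD (f'.length + i / 2) ' '
            = ((a :: f') ++ b :: s').getD ((a :: f').length + (i / 2 + 1)) ' '
          have e3 : (a :: f').length + (i / 2 + 1) = (a :: f' ++ [b]).length + i / 2 := by
            simp; omega
          rw [e3]
          have e4 : (a :: f') ++ b :: s' = (a :: f' ++ [b]) ++ s' := by simp
          rw [e4, pv_getD_append_right, pv_getD_append_right]
      show a :: b :: (((f'.zip s').map (fun p => [p.1, p.2])).flatten ++ f'.drop s'.length) = _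
      rw [ih f' hb1 hb2, tail_eq]
      have hlen : (a :: f').length + (b :: s').length = (f'.length + s'.length) + 1 + 1 := by
        simp; omega
      rw [hlen, List.range_succ_eq_map, List.range_succ_eq_map]
      simp only [List.map_cons, List.map_map]
      refine congrArg₂ _ ?_ (congrArg₂ _ ?_ rfl)
      · simp
      · show b = (if (0 + 1) % 2 = 0 then _ else ((a :: f') ++ (b :: s')).getD ((a :: f').length + (0 + 1) / 2) ' ')
        rw [if_neg (by omega)]
        have : (a :: f').length + (0 + 1) / 2 = (a :: f').length + 0 := by omega
        rw [this, pv_getD_append_right]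
        simp

theorem pvB_eq_posMap (w : List Char) : pvBWord w = pvPosMap w := by
  unfold pvBWord
  simp only [PySem.List.slice_to_natCast, PySem.List.slice_from_natCast]
  set m := (w.length + 1) / 2 with hm
  have hm' : m ≤ w.length := by omega
  have hf : (w.take m).length = m := by simp [hm']
  have hs : (w.drop m).length = w.length - m := by simp
  have h1 : (w.drop m).length ≤ (w.take m).length := by rw [hf, hs]; omega
  have h2 : (w.take m).length ≤ (w.drop m).length + 1 := by rw [hf, hs]; omega
  rw [pv_join_nil_flatten, pvInterleave _ _ h1 h2]
  rw [List.take_append_drop]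
  unfold pvPosMap pvPos
  rw [hf, hs]
  have hn : m + (w.length - m) = w.length := by omega
  rw [hn]

-- A's inner loop invariant
theorem pvAloop (w : List Char) (k : Nat) (hk : k ≤ w.length) :
    (PySem.List.pyRange 0 (k : Int) 1).foldl (pvAStep w)
        (List.replicate w.length ([] : List Char), 0, (((w.length + 1) / 2 : Nat) : Int))
      = ((List.range k).map (fun i => [pvPos w i]) ++ List.replicate (w.length - k) [],
         (((k + 1) / 2 : Nat) : Int), (((w.length + 1) / 2 + k / 2 : Nat) : Int)) := by
  induction k with
  | zero => simp [PySem.List.pyRange_one_eq_nil]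
  | succ k ih =>
    have hk' : k ≤ w.length := by omega
    rw [show ((k + 1 : Nat) : Int) = (k : Int) + 1 by push_cast; ring]
    rw [PySem.List.pyRange_one_succ_right (a := 0) (b := (k : Int)) (by exact Int.natCast_nonneg k), List.foldl_append]
    rw [ih hk']
    simp only [List.foldl_cons, List.foldl_nil]
    unfold pvAStep
    rw [show (2 : Int) = ((2 : Nat) : Int) by norm_cast]
    simp only [PySem.Int.mod_natCast]
    by_cases hp : k % 2 = 0
    · rw [if_pos (by rw [hp]; rfl)]
      simp only [PySem.List.pySetD_natCast, PySem.List.pyGetD_natCast]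
      have hval : w.getD ((k + 1) / 2) ' ' = pvPos w k := by
        unfold pvPos; rw [if_pos hp]; congr 1; omega
      rw [hval]
      refine congrArg₂ _ ?_ (congrArg₂ _ ?_ ?_)
      · rw [List.set_append, if_neg (by simp)]
        have hlp : ((List.range k).map (fun i => [pvPos w i])).length = k := by simp
        rw [hlp, Nat.sub_self]
        have hrep : List.replicate (w.length - k) ([] : List Char)
            = ([] : List Char) :: List.replicate (w.length - (k + 1)) [] := by
          rw [show w.length - k = (w.length - (k + 1)) + 1 by omega]; rfl
        rw [hrep, List.set_cons_zero, List.range_succ, List.map_append]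
        simp
      · push_cast; omega
      · norm_cast; omega
    · rw [if_neg (by omega)]
      simp only [PySem.List.pySetD_natCast, PySem.List.pyGetD_natCast]
      have hval : w.getD ((w.length + 1) / 2 + k / 2) ' ' = pvPos w k := by
        unfold pvPos; rw [if_neg hp]
      rw [hval]
      refine congrArg₂ _ ?_ (congrArg₂ _ ?_ ?_)
      · rw [List.set_append, if_neg (by simp)]
        have hlp : ((List.range k).map (fun i => [pvPos w i])).length = k := by simp
        rw [hlp, Nat.sub_self]
        have hrep : List.replicate (w.length - k) ([] : List Char)
            = ([] : List Char) :: List.replicate (w.length - (k + 1)) [] := by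
          rw [show w.length - k = (w.length - (k + 1)) + 1 by omega]; rfl
        rw [hrep, List.set_cons_zero, List.range_succ, List.map_append]
        simp
      · norm_cast; omega
      · push_cast; omega

theorem pvA_eq_posMap (w : List Char) : pvAWord w = pvPosMap w := by
  show PySem.Chars.join []
      ((PySem.List.pyRange 0 ((w.length : Int)) 1).foldl (pvAStep w)
        (List.replicate w.length ([] : List Char), 0,
          PySem.Int.floordiv ((w.length : Int) + 1) 2)).1 = pvPosMap w
  rw [show ((w.length : Int) + 1) = ((w.length + 1 : Nat) : Int) by push_cast; ring,
      show (2 : Int) = ((2 : Nat) : Int) by norm_cast, PySem.Int.floordiv_natCast]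
  rw [pvAloop w w.length le_rfl]
  simp only [Nat.sub_self, List.replicate_zero, List.append_nil]
  show PySem.Chars.join [] ((List.range w.length).map (fun i => [pvPos w i])) = pvPosMap w
  rw [show (List.range w.length).map (fun i => [pvPos w i])
        = ((List.range w.length).map (pvPos w)).map (fun c => [c]) by rw [List.map_map]; rfl]
  rw [PySem.Chars.join_nil_singletons]
  rfl

-- ===== VERDICT (by name: the statement is the Claim_ definition above) =====
theorem reverse_encode_index_parity_spec : Claim_equal_reverse_encode_index_parity := by
  intro x _
  unfold Spec_reverse_encode_index_parity reverse_encode_index_parity reverse_encode_index_parity_alt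
  simp only [PySem.List.foldl_append_singleton_eq_map, List.nil_append]
  congr 2
  exact List.map_congr_left (fun w _ => (pvA_eq_posMap w).trans (pvB_eq_posMap w).symm)
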